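-- pv_equiv track=rewrite | github.com/python-ml-study-group/Practice | Pranaya/anagrams.py | remove_duplicate_anagrams
-- ===== SOURCE A (Python) =====
-- def remove_duplicate_anagrams(strings):
--     unique_strings = set()
--     sorted_strings = set()
--
--     for string in strings:
--         sorted_string = ''.join(sorted(string))
--         if sorted_string not in sorted_strings:
--             unique_strings.add(string)
--             sorted_strings.add(sorted_string)
--
--     return unique_strings
-- ===== SOURCE B (Python) =====
-- def remove_duplicate_anagrams(strings):
--     result = set()
--     remaining = [(''.join(sorted(s)), s) for s in strings]
--     while remaining:
--         key, head = remaining[0]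
--         result.add(head)
--         remaining = [p for p in remaining[1:] if p[0] != key]
--     return result
-- ===== Notes on version B (the rewrite author's own statement) =====
-- stated objective: alternative
-- what changed: B keeps no seen-key set: it tags each string with its sorted-letter key once, then repeatedly takes the first remaining string as a representative and filters its entire anagram class out of the remainder, whereas A does one pass with two auxiliary sets.
import Mathlib
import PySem

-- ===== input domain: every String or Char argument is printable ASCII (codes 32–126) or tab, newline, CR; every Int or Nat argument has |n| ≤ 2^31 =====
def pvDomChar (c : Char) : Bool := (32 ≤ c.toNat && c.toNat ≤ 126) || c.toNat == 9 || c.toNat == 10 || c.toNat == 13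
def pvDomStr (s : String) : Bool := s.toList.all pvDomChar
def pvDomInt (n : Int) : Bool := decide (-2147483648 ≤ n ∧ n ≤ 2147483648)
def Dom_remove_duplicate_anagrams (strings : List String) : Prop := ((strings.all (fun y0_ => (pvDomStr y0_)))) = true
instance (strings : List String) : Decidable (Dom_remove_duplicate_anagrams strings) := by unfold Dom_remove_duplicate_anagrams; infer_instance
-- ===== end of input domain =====

-- ===== PORT A =====
-- B replaces A's one-pass two-set dedup by repeated class filtering (no seen-key set); same return value, no mutation.

-- ''.join(sorted(string)): sort the characters and rebuild the string
def pvSortKey (s : String) : String := String.ofList (PySem.List.sorted s.toList (fun c => c) false)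

def remove_duplicate_anagrams (strings : List String) : List String :=
  (strings.foldl
    (fun (st : PySem.Set String × PySem.Set String) string =>
      let sorted_string := pvSortKey string
      if PySem.Set.contains st.2 sorted_string = false then
        (PySem.Set.add st.1 string, PySem.Set.add st.2 sorted_string)
      else st)
    (PySem.Set.empty, PySem.Set.empty)).1

-- ===== PORT B =====
-- the while loop: state is (result, remaining) where remaining holds (key, string) pairs;
-- each step consumes remaining[0] and filters its anagram class out of remaining[1:]
def pvBLoop (result : PySem.Set String) (remaining : List (String × String)) : PySem.Set String :=
  match remaining with
  | [] => result
  | p :: tail =>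
      pvBLoop (PySem.Set.add result p.2) (tail.filter (fun q => q.1 != p.1))
termination_by remaining.length
decreasing_by simp; exact le_trans (List.length_filter_le _ _) (by simp)

def remove_duplicate_anagrams_alt (strings : List String) : List String :=
  pvBLoop PySem.Set.empty (strings.map (fun s => (pvSortKey s, s)))

-- ===== PRECONDITION & SPEC =====
def Spec_remove_duplicate_anagrams (strings : List String) (out : List String) : Prop := out = remove_duplicate_anagrams_alt strings
instance (strings : List String) (out : List String) : Decidable (Spec_remove_duplicate_anagrams strings out) := by unfold Spec_remove_duplicate_anagrams; infer_instance

-- ===== CLAIM (what is proved, stated in full; the proofs are below) =====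
def Claim_equal_remove_duplicate_anagrams : Prop := ∀ (strings : List String), Dom_remove_duplicate_anagrams strings → Spec_remove_duplicate_anagrams strings (remove_duplicate_anagrams strings)

-- ===== LEMMAS AND PROOFS =====

-- A's loop body, named for the bridging lemma
def pvAStep (st : PySem.Set String × PySem.Set String) (string : String) :
    PySem.Set String × PySem.Set String :=
  let sorted_string := pvSortKey string
  if PySem.Set.contains st.2 sorted_string = false then
    (PySem.Set.add st.1 string, PySem.Set.add st.2 sorted_string)
  else st

-- Bridge: A's fold from state (u, sk) computes what B's loop computes on the remaining
-- list pre-filtered by the already-seen keys sk.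
lemma pvBridge (xs : List String) : ∀ (u sk : PySem.Set String),
    (xs.foldl pvAStep (u, sk)).1
      = pvBLoop u ((xs.map (fun s => (pvSortKey s, s))).filter
          (fun p => !(PySem.Set.contains sk p.1))) := by
  induction xs with
  | nil => intro u sk; simp only [List.map_nil, List.filter_nil]; rw [pvBLoop]; rfl
  | cons x xs ih =>
      intro u sk
      simp only [List.foldl_cons, List.map_cons, List.filter_cons]
      by_cases hx : PySem.Set.contains sk (pvSortKey x) = false
      · -- fresh key: A records x and its key; B takes x and filters its class away
        have hmem : pvSortKey x ∉ sk := by simpa [PySem.Set.contains] using hx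
        rw [if_pos (by simp [PySem.Set.contains, hmem])]
        have hstep : pvAStep (u, sk) x = (PySem.Set.add u x, PySem.Set.add sk (pvSortKey x)) := by
          simp only [pvAStep, hx]; rfl
        rw [hstep, ih]
        conv_rhs => rw [pvBLoop]
        rw [List.filter_filter]
        congr 1
        refine List.filter_congr ?_
        intro p hp
        obtain ⟨s, _, rfl⟩ := List.mem_map.mp hp
        by_cases hk : pvSortKey s = pvSortKey x
        · simp [hk, PySem.Set.contains, PySem.Set.add, hmem]
        · simp [PySem.Set.contains, PySem.Set.add, hmem, hk]
      · -- seen key: A skips x; B's pre-filter drops x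
        rw [if_neg (by simpa using hx)]
        have hstep : pvAStep (u, sk) x = (u, sk) := by
          simp only [pvAStep]
          rw [if_neg (by simpa using hx)]
        rw [hstep, ih]

-- ===== VERDICT (by name: the statement is the Claim_ definition above) =====
theorem remove_duplicate_anagrams_spec : Claim_equal_remove_duplicate_anagrams := by
  intro strings _
  unfold Spec_remove_duplicate_anagrams remove_duplicate_anagrams remove_duplicate_anagrams_alt
  show (strings.foldl pvAStep (PySem.Set.empty, PySem.Set.empty)).1
      = pvBLoop PySem.Set.empty (strings.map (fun s => (pvSortKey s, s)))
  rw [pvBridge]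
  congr 1
  simp [PySem.Set.contains, PySem.Set.empty]
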